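-- pv_equiv track=rewrite | github.com/ALOHAALOHAALOJHA/FARFAN_MCDPP | src/canonic_phases/phase_2/phase2_d_irrigation_orchestrator.py | _find_missing_combinations
-- ===== SOURCE A (Python) =====
-- def _find_missing_combinations(chunks_dict: dict) -> list[str]:
--     """Find missing (PA, DIM) combinations."""
--     expected = {
--         (f"PA{i:02d}", f"DIM{j:02d}")
--         for i in range(1, 11)
--         for j in range(1, 7)
--     }
--     actual = set(chunks_dict.keys())
--     missing = expected - actual
--     return [f"{pa}-{dim}" for pa, dim in sorted(missing)]
-- ===== SOURCE B (Python) =====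
-- def _find_missing_combinations(chunks_dict: dict) -> list[str]:
--     """Find missing (PA, DIM) combinations."""
--     missing = []
--     for i in range(1, 11):
--         pa = f"PA{i:02d}"
--         for j in range(1, 7):
--             dim = f"DIM{j:02d}"
--             if (pa, dim) not in chunks_dict:
--                 missing.append(f"{pa}-{dim}")
--     return missing
-- ===== Notes on version B (the rewrite author's own statement) =====
-- stated objective: simpler
-- what changed: Drops the expected-set construction, the set difference and the final sort: a nested numeric loop emits each absent label directly, already in sorted order because the zero-padded labels sort lexicographically in loop order.
import Mathlib
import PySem

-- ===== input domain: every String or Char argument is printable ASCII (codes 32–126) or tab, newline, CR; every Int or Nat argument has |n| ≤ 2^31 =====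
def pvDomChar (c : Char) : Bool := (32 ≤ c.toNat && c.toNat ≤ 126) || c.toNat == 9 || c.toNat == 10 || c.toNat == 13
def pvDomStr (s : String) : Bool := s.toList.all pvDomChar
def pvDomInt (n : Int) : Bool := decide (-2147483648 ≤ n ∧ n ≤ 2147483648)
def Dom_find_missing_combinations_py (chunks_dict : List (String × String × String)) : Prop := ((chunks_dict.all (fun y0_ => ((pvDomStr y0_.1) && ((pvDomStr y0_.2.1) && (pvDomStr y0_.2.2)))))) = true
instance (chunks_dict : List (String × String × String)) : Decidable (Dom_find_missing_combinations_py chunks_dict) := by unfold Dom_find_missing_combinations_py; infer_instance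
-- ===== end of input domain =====

-- B drops A's expected-set construction, the set difference and the final sort: the nested
-- numeric loop emits absent labels directly, already in sorted order (objective: simpler).
-- The dict chunks_dict is keyed by the (pa, dim) pair: an entry (pa, dim, v) has key (pa, dim).

-- f"{pre}{n:02d}" — hand port of the f-string padding, exact for 0 ≤ n ≤ 99 (used with 1 ≤ n ≤ 10);
-- built over List Char / String.ofList so it is kernel-transparent.
def pvFmt (pre : String) (n : Int) : String :=
  String.ofList (pre.toList ++ (let ds := PySem.Int.toChars n; if ds.length < 2 then '0' :: ds else ds))

-- f"{pa}-{dim}" (kernel-transparent concatenation)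
def pvDash (pa dim : String) : String := String.ofList (pa.toList ++ '-' :: dim.toList)

-- ===== PORT A =====
-- sorted(missing) compares (str, str) tuples lexicographically by code point; ported as
-- sorted2 on the char lists of the components — exact on the ASCII domain Dom.
def find_missing_combinations_py (chunks_dict : List (String × String × String)) : List String :=
  let expected : PySem.Set (String × String) :=
    PySem.Set.ofList ((PySem.List.pyRange 1 11 1).flatMap (fun i =>
      (PySem.List.pyRange 1 7 1).map (fun j => (pvFmt "PA" i, pvFmt "DIM" j))))
  let actual : PySem.Set (String × String) :=
    PySem.Set.ofList (chunks_dict.map (fun kv => (kv.1, kv.2.1)))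
  let missing := PySem.Set.diff expected actual
  (PySem.List.sorted2 missing (fun p => p.1.toList) (fun p => p.2.toList)).map
    (fun p => pvDash p.1 p.2)

-- ===== PORT B =====
def find_missing_combinations_py_alt (chunks_dict : List (String × String × String)) : List String :=
  (PySem.List.pyRange 1 11 1).foldl (fun missing i =>
    let pa := pvFmt "PA" i
    (PySem.List.pyRange 1 7 1).foldl (fun missing j =>
      let dim := pvFmt "DIM" j
      if !(chunks_dict.any (fun kv => kv.1 == pa && kv.2.1 == dim)) then
        missing ++ [pvDash pa dim]
      else missing) missing) []

-- ===== PRECONDITION & SPEC =====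
def Spec_find_missing_combinations_py (chunks_dict : List (String × String × String)) (out : List String) : Prop := out = find_missing_combinations_py_alt chunks_dict
instance (chunks_dict : List (String × String × String)) (out : List String) : Decidable (Spec_find_missing_combinations_py chunks_dict out) := by unfold Spec_find_missing_combinations_py; infer_instance

-- ===== CLAIM (what is proved, stated in full; the proofs are below) =====
def Claim_equal_find_missing_combinations_py : Prop := ∀ (chunks_dict : List (String × String × String)), Dom_find_missing_combinations_py chunks_dict → Spec_find_missing_combinations_py chunks_dict (find_missing_combinations_py chunks_dict)

-- ===== LEMMAS AND PROOFS =====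

-- the 60 expected key pairs, in A's comprehension order (= B's loop order)
def pvE60 : List (String × String) :=
  (PySem.List.pyRange 1 11 1).flatMap (fun i =>
    (PySem.List.pyRange 1 7 1).map (fun j => (pvFmt "PA" i, pvFmt "DIM" j)))

-- the comparison sorted2 uses (reverse = false)
def pvLt (a b : String × String) : Bool :=
  decide (a.1.toList < b.1.toList) || (!decide (b.1.toList < a.1.toList) && decide (a.2.toList < b.2.toList))

-- a left fold of insertBy over a list already strictly ordered for `before` is the identity
theorem pv_foldl_insertBy_self {α : Type} (before : α → α → Bool) (xs : List α)
    (h : xs.Pairwise (fun a b => before b a = false)) :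
    xs.foldl (fun acc x => PySem.List.insertBy before x acc) [] = xs := by
  induction xs using List.reverseRecOn with
  | nil => rfl
  | append_singleton ys y ih =>
    rw [List.foldl_append, List.foldl_cons, List.foldl_nil]
    rw [ih ((List.pairwise_append.mp h).1)]
    exact PySem.List.insertBy_of_forall_not_before _ _ _
      (fun z hz => (List.pairwise_append.mp h).2.2 z hz y (by simp))

theorem pv_e60_nodup : pvE60.Nodup := by decide

theorem pv_e60_pairwise : pvE60.Pairwise (fun a b => pvLt b a = false) := by decide

-- membership test of B = membership in the key list of A
theorem pv_any_eq_contains (chunks_dict : List (String × String × String)) (pa dim : String) :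
    (chunks_dict.any (fun kv => kv.1 == pa && kv.2.1 == dim)) =
      ((chunks_dict.map (fun kv => (kv.1, kv.2.1))).contains (pa, dim)) := by
  apply Bool.eq_iff_iff.mpr
  simp only [List.any_eq_true, List.contains_iff_mem, List.mem_map, Bool.and_eq_true, beq_iff_eq,
    Prod.ext_iff]

theorem pv_contains_ofList {α : Type} [BEq α] [LawfulBEq α] (xs : List α) (p : α) :
    (PySem.Set.ofList xs).contains p = xs.contains p := by
  by_cases hm : p ∈ xs <;>
    simp [PySem.Set.contains, PySem.Set.mem_ofList, hm]

theorem pvA_eq (cd : List (String × String × String)) :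
    find_missing_combinations_py cd =
      (pvE60.filter (fun q => !((cd.map (fun kv => (kv.1, kv.2.1))).contains q))).map
        (fun p => pvDash p.1 p.2) := by
  have h1 : PySem.Set.ofList pvE60 = pvE60 := PySem.Set.ofList_eq_self_of_nodup _ pv_e60_nodup
  simp only [find_missing_combinations_py]
  rw [show ((PySem.List.pyRange 1 11 1).flatMap (fun i =>
      (PySem.List.pyRange 1 7 1).map (fun j => (pvFmt "PA" i, pvFmt "DIM" j)))) = pvE60 from rfl,
    h1]
  show ((pvE60.filter
      (fun q => !(PySem.Set.ofList (cd.map (fun kv => (kv.1, kv.2.1)))).contains q)).foldl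
      (fun acc x => PySem.List.insertBy pvLt x acc) []).map (fun p => pvDash p.1 p.2) = _
  simp only [pv_contains_ofList]
  rw [pv_foldl_insertBy_self pvLt _
    (List.Pairwise.sublist List.filter_sublist pv_e60_pairwise)]

theorem pvB_eq (cd : List (String × String × String)) :
    find_missing_combinations_py_alt cd =
      (pvE60.filter (fun q => !((cd.map (fun kv => (kv.1, kv.2.1))).contains q))).map
        (fun p => pvDash p.1 p.2) := by
  simp only [find_missing_combinations_py_alt, PySem.List.foldl_append_if,
    PySem.List.foldl_append_eq_flatMap, List.nil_append]
  simp only [pvE60, List.filter_flatMap, List.map_flatMap, List.filter_map, List.map_map,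
    Function.comp_def, pv_any_eq_contains]

-- ===== VERDICT (by name: the statement is the Claim_ definition above) =====
theorem find_missing_combinations_py_spec : Claim_equal_find_missing_combinations_py := by
  intro chunks_dict _
  show find_missing_combinations_py chunks_dict = find_missing_combinations_py_alt chunks_dict
  rw [pvA_eq, pvB_eq]
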